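-- pv_equiv track=rewrite | github.com/HKUST-KnowComp/FolkScope | src/pattern/utils.py | get_cumulative_leftmost
-- ===== SOURCE A (Python) =====
-- def get_cumulative_leftmost(cum, x):
--     # binary search
--     i = 0
--     j = len(cum)
--     while i < j:
--         k = (i + j) // 2
--         if cum[k][0] < x:
--             i = k + 1
--         else:
--             j = k
--     if i < len(cum):
--         return cum[i]
--     else:
--         return cum[-1]
-- ===== SOURCE B (Python) =====
-- def get_cumulative_leftmost(cum, x):
--     def go(lo, n):
--         # leftmost index in [lo, lo+n) whose first component is >= x,
--         # or lo+n if none; recursion on the interval length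
--         if n == 0:
--             return lo
--         half = n // 2
--         if cum[lo + half][0] < x:
--             return go(lo + half + 1, n - half - 1)
--         else:
--             return go(lo, half)
--     i = go(0, len(cum))
--     return cum[i] if i < len(cum) else cum[-1]
-- ===== Notes on version B (the rewrite author's own statement) =====
-- stated objective: alternative
-- what changed: A's iterative while-loop binary search over two Int bounds (i, j) is replaced by a recursive divide-and-conquer helper over (lo, interval-length n) that halves the length; the fallback return stays the same.
import Mathlib
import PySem

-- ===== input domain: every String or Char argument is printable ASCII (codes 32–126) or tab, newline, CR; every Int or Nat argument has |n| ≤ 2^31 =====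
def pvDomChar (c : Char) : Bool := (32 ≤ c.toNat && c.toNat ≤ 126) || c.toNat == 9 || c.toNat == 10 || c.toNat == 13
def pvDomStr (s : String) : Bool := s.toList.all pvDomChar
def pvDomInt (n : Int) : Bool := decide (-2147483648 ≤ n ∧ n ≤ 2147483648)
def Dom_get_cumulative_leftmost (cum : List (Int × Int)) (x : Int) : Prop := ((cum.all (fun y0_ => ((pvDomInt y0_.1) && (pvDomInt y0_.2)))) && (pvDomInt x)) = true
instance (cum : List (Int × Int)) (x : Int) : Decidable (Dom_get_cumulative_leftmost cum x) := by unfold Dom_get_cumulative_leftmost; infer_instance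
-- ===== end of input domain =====

-- B replaces A's iterative two-bound (i, j) binary-search loop by a recursive
-- divide-and-conquer helper over (lo, interval-length n); same O(log n) cost,
-- same return value (alternative decomposition, no speed claim).

-- ===== PORT A =====
-- the 'while i < j' loop of A, as recursion on the gap (j - i); cum[k] is always
-- in range when 0 ≤ i < j ≤ len cum, so the .getD default is never consulted there
def get_cumulative_leftmost_loop (cum : List (Int × Int)) (x i j : Int) : Int :=
  if h : i < j then
    let k := PySem.Int.floordiv (i + j) 2
    if ((PySem.List.pyGet? cum k).getD (0, 0)).1 < x then
      get_cumulative_leftmost_loop cum x (k + 1) j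
    else
      get_cumulative_leftmost_loop cum x i k
  else i
termination_by (j - i).toNat
decreasing_by
  · have hb := PySem.Int.floordiv_two_mid_bounds (le_of_lt h)
    omega
  · have hlt : PySem.Int.floordiv (i + j) 2 < j := by
      rw [PySem.Int.floordiv_lt_iff_lt_mul (by norm_num : (0:Int) < 2)]
      omega
    omega

def get_cumulative_leftmost (cum : List (Int × Int)) (x : Int) : Int × Int :=
  let i := get_cumulative_leftmost_loop cum x 0 (cum.length : Int)
  if i < (cum.length : Int) then (PySem.List.pyGet? cum i).getD (0, 0)
  else (PySem.List.pyGet? cum (-1)).getD (0, 0)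

-- ===== PORT B =====
-- Source B's helper go(lo, n): recursion on the interval length n
def get_cumulative_leftmost_go (cum : List (Int × Int)) (x : Int) (lo : Int) (n : Nat) : Int :=
  if hn : n = 0 then lo
  else
    let half := n / 2
    if ((PySem.List.pyGet? cum (lo + (half : Int))).getD (0, 0)).1 < x then
      get_cumulative_leftmost_go cum x (lo + (half : Int) + 1) (n - half - 1)
    else
      get_cumulative_leftmost_go cum x lo half
termination_by n
decreasing_by
  · omega
  · omega

def get_cumulative_leftmost_alt (cum : List (Int × Int)) (x : Int) : Int × Int :=
  let i := get_cumulative_leftmost_go cum x 0 cum.length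
  if i < (cum.length : Int) then (PySem.List.pyGet? cum i).getD (0, 0)
  else (PySem.List.pyGet? cum (-1)).getD (0, 0)

-- ===== PRECONDITION & SPEC =====
-- Python A raises IndexError (cum[-1]) exactly on the empty list
def Pre_get_cumulative_leftmost (cum : List (Int × Int)) (x : Int) : Prop := cum ≠ []
instance (cum : List (Int × Int)) (x : Int) : Decidable (Pre_get_cumulative_leftmost cum x) := by unfold Pre_get_cumulative_leftmost; infer_instance
def pvWitness_get_cumulative_leftmost : (List (Int × Int)) × Int := ([(1, 10), (3, 20)], 2)

def Spec_get_cumulative_leftmost (cum : List (Int × Int)) (x : Int) (out : Int × Int) : Prop := out = get_cumulative_leftmost_alt cum x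
instance (cum : List (Int × Int)) (x : Int) (out : Int × Int) : Decidable (Spec_get_cumulative_leftmost cum x out) := by unfold Spec_get_cumulative_leftmost; infer_instance

-- ===== CLAIM (what is proved, stated in full; the proofs are below) =====
def Claim_equal_get_cumulative_leftmost : Prop := ∀ (cum : List (Int × Int)) (x : Int), Dom_get_cumulative_leftmost cum x → Pre_get_cumulative_leftmost cum x → Spec_get_cumulative_leftmost cum x (get_cumulative_leftmost cum x)

-- ===== LEMMAS AND PROOFS =====

-- the midpoint of [i, i+n) in A's Int form equals i + n/2 (Nat division)
theorem pv_mid_eq (i : Int) (n : Nat) :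
    PySem.Int.floordiv (i + (i + (n : Int))) 2 = i + ((n / 2 : Nat) : Int) := by
  rw [PySem.Int.floordiv_eq_iff_of_pos (by norm_num : (0:Int) < 2)]
  omega

-- A's loop on bounds (i, i+n) computes B's go on (i, n)
theorem pv_loop_eq_go (cum : List (Int × Int)) (x : Int) :
    ∀ (n : Nat) (i j : Int), i ≤ j → (j - i).toNat = n →
      get_cumulative_leftmost_loop cum x i j = get_cumulative_leftmost_go cum x i n := by
  intro n
  induction n using Nat.strong_induction_on with
  | _ n ih =>
    intro i j hij hn
    have hj : j = i + (n : Int) := by omega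
    subst hj
    rw [get_cumulative_leftmost_loop, get_cumulative_leftmost_go]
    by_cases h0 : n = 0
    · simp [h0]
    · have hlt : i < i + (n : Int) := by omega
      rw [dif_pos hlt, dif_neg h0]
      rw [pv_mid_eq]
      dsimp only
      split
      · exact ih (n - n / 2 - 1) (by omega) _ _ (by omega) (by omega)
      · exact ih (n / 2) (by omega) _ _ (by omega) (by omega)

-- ===== VERDICT (by name: the statement is the Claim_ definition above) =====
theorem get_cumulative_leftmost_spec : Claim_equal_get_cumulative_leftmost := by
  intro cum x _ _
  unfold Spec_get_cumulative_leftmost get_cumulative_leftmost get_cumulative_leftmost_alt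
  rw [pv_loop_eq_go cum x cum.length 0 (cum.length : Int) (by omega) (by omega)]
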